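-- pv_equiv track=rewrite | github.com/uustortoise/Beta_6 | backend/scripts/bedroom_day_segment_audit.py | _transition_counts
-- ===== SOURCE A (Python) =====
-- from typing import Any, Mapping, Sequence
--
-- def _transition_counts(labels: Sequence[str]) -> dict[str, int]:
--     counts: dict[str, int] = {}
--     for current, nxt in zip(labels, labels[1:]):
--         if current == nxt:
--             continue
--         key = f"{current} -> {nxt}"
--         counts[key] = counts.get(key, 0) + 1
--     return dict(sorted(counts.items()))
-- ===== SOURCE B (Python) =====
-- from itertools import groupby
-- from typing import Sequence
--
--
-- def _transition_counts(labels: Sequence[str]) -> dict[str, int]: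
--     events = sorted(f"{current} -> {nxt}"
--                     for current, nxt in zip(labels, labels[1:])
--                     if current != nxt)
--     return {key: sum(1 for _ in group) for key, group in groupby(events)}
-- ===== Notes on version B (the rewrite author's own statement) =====
-- stated objective: alternative
-- what changed: A counts transitions in a dict while scanning the pairs and then sorts the distinct keys; B first materialises the filtered transition-event strings, sorts them all, and counts consecutive runs (itertools.groupby), so the sorted order falls out of the event sort instead of a post-hoc sort of dict items.
import Mathlib
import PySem

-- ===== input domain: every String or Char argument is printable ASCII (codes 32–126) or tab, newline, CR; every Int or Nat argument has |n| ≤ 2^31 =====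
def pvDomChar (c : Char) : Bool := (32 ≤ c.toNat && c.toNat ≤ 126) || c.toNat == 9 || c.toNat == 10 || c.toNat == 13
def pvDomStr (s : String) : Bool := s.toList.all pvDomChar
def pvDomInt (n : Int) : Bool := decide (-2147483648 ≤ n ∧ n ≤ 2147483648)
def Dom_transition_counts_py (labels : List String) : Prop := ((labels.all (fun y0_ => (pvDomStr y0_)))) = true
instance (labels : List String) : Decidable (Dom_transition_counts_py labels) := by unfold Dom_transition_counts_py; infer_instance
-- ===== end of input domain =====

-- B sorts the transition-event strings and counts consecutive runs (sort-then-groupby)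
-- instead of A's hash-count-then-sort-distinct-keys; objective: alternative algorithm, same result.

-- the f-string f"{current} -> {nxt}" (used by both Pythons)
def pvKey (c n : String) : String := c ++ " -> " ++ n

-- ===== PORT A =====
def transition_counts_py (labels : List String) : List (String × Int) :=
  let counts : PySem.Dict String Int :=
    (labels.zip (PySem.List.slice labels (some 1) none)).foldl
      (fun d p =>
        if p.1 = p.2 then d
        else d.insert (pvKey p.1 p.2) (d.getD (pvKey p.1 p.2) 0 + 1))
      PySem.Dict.empty
  -- dict(sorted(counts.items())) : items sorted by the (key, value) tuple, Python-lexicographically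
  PySem.List.sorted2 counts.items Prod.fst Prod.snd

-- ===== PORT B =====
-- itertools.groupby on a list of strings, each group replaced by (key, run length)
def pvRunLen : List String → List (String × Int)
  | [] => []
  | x :: xs =>
      (x, 1 + ((xs.takeWhile (fun y => y == x)).length : Int)) ::
        pvRunLen (xs.dropWhile (fun y => y == x))
termination_by s => s.length
decreasing_by
  simp only [List.length_cons]
  exact Nat.lt_succ_of_le (List.length_dropWhile_le _ _)

def transition_counts_py_alt (labels : List String) : List (String × Int) :=
  let events :=
    ((labels.zip (PySem.List.slice labels (some 1) none)).filter
        (fun p => !(p.1 == p.2))).map (fun p => pvKey p.1 p.2)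
  pvRunLen (PySem.List.sorted events (fun x => x))

-- ===== PRECONDITION & SPEC =====
def Spec_transition_counts_py (labels : List String) (out : List (String × Int)) : Prop := out = transition_counts_py_alt labels
instance (labels : List String) (out : List (String × Int)) : Decidable (Spec_transition_counts_py labels out) := by unfold Spec_transition_counts_py; infer_instance

-- ===== CLAIM (what is proved, stated in full; the proofs are below) =====
def Claim_equal_transition_counts_py : Prop := ∀ (labels : List String), Dom_transition_counts_py labels → Spec_transition_counts_py labels (transition_counts_py labels)

-- ===== LEMMAS AND PROOFS =====

theorem pv_insertBy_perm {α : Type} (b : α → α → Bool) (x : α) (ys : List α) :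
    (PySem.List.insertBy b x ys).Perm (x :: ys) := by
  induction ys with
  | nil => simp [PySem.List.insertBy]
  | cons y ys ih =>
    simp only [PySem.List.insertBy]
    split
    · exact List.Perm.refl _
    · exact (ih.cons y).trans (List.Perm.swap x y ys)

theorem pv_insertBy_congr {α : Type} (b1 b2 : α → α → Bool) (x : α) (ys : List α)
    (h : ∀ y ∈ ys, b1 x y = b2 x y) :
    PySem.List.insertBy b1 x ys = PySem.List.insertBy b2 x ys := by
  induction ys with
  | nil => rfl
  | cons y ys ih =>
    simp only [PySem.List.insertBy]
    rw [h y (by simp)]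
    split
    · rfl
    · rw [ih (fun z hz => h z (by simp [hz]))]

theorem pv_foldl_insertBy_congr {α : Type} (b1 b2 : α → α → Bool) :
    ∀ (xs acc : List α), (acc ++ xs).Nodup →
      (∀ x ∈ xs, ∀ y, (y ∈ acc ∨ y ∈ xs) → x ≠ y → b1 x y = b2 x y) →
      xs.foldl (fun a x => PySem.List.insertBy b1 x a) acc
        = xs.foldl (fun a x => PySem.List.insertBy b2 x a) acc := by
  intro xs
  induction xs with
  | nil => intro acc _ _; rfl
  | cons x xs ih =>
    intro acc hnd h
    simp only [List.foldl_cons]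
    have hxacc : x ∉ acc := by
      intro hx
      exact List.disjoint_of_nodup_append hnd hx (by simp)
    rw [pv_insertBy_congr b1 b2 x acc
      (fun y hy => h x (by simp) y (Or.inl hy) (fun he => hxacc (he ▸ hy)))]
    apply ih
    · have hperm : ((PySem.List.insertBy b2 x acc) ++ xs).Perm (acc ++ x :: xs) :=
        ((pv_insertBy_perm b2 x acc).append_right xs).trans List.perm_middle.symm
      exact hperm.symm.nodup hnd
    · intro x' hx' y hy hne
      refine h x' (by simp [hx']) y ?_ hne
      rcases hy with hy | hy
      · rcases (PySem.List.mem_insertBy b2 x y acc).mp hy with rfl | hy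
        · exact Or.inr (by simp)
        · exact Or.inl hy
      · exact Or.inr (by simp [hy])

theorem pv_sorted2_eq_sorted {α : Type} (xs : List α) (k1 : α → String) (k2 : α → Int)
    (h : (xs.map k1).Nodup) :
    PySem.List.sorted2 xs k1 k2 = PySem.List.sorted xs k1 := by
  rw [PySem.List.sorted_eq_foldl_insertBy]
  simp only [PySem.List.sorted2, if_neg (by decide : ¬ (false = true))]
  apply pv_foldl_insertBy_congr _ _ xs []
  · simpa using h.of_map
  · intro x hx y hy hne
    have hy' : y ∈ xs := by simpa using hy
    have hk : k1 x ≠ k1 y := fun he => hne (List.inj_on_of_nodup_map h hx hy' he)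
    rcases lt_trichotomy (k1 x) (k1 y) with hlt | heq | hgt
    · simp [hlt]
    · exact absurd heq hk
    · simp [hgt, not_lt_of_gt hgt]

theorem pv_drop_gt (x : String) (xs : List String)
    (hs : (x :: xs).Pairwise (· ≤ ·)) :
    ∀ y ∈ xs.dropWhile (fun y => y == x), x < y := by
  intro y hy
  have hxle : ∀ z ∈ xs, x ≤ z := (List.pairwise_cons.mp hs).1
  cases ht : xs.dropWhile (fun y => y == x) with
  | nil => simp [ht] at hy
  | cons y0 t' =>
    rw [ht] at hy
    have h0 : (y0 == x) = false := by
      have := List.head?_dropWhile_not (fun y => y == x) xs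
      rw [ht] at this; simpa using this
    have hy0mem : y0 ∈ xs := (List.dropWhile_sublist (fun y => y == x)).mem (by rw [ht]; simp)
    have hy0 : x < y0 :=
      lt_of_le_of_ne (hxle y0 hy0mem) (fun he => by rw [← he] at h0; simp at h0)
    rcases List.mem_cons.mp hy with rfl | hy'
    · exact hy0
    · have hp : (y0 :: t').Pairwise (· ≤ ·) := by
        rw [← ht]
        exact List.Pairwise.sublist ((List.dropWhile_sublist _).trans (List.sublist_cons_self x xs)) hs
      exact lt_of_lt_of_le hy0 ((List.pairwise_cons.mp hp).1 y hy')

theorem pv_fst_mem_runLen : ∀ (s : List String) (p : String × Int), p ∈ pvRunLen s → p.1 ∈ s := by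
  intro s
  induction s using pvRunLen.induct with
  | case1 => intro p hp; simp [pvRunLen] at hp
  | case2 x xs ih =>
    intro p hp
    rw [pvRunLen] at hp
    rcases List.mem_cons.mp hp with rfl | hp'
    · simp
    · exact List.mem_cons_of_mem x ((List.dropWhile_sublist _).mem (ih p hp'))

theorem pv_runLen_pairwise : ∀ (s : List String), s.Pairwise (· ≤ ·) →
    (pvRunLen s).Pairwise (fun a b => a.1 < b.1) := by
  intro s
  induction s using pvRunLen.induct with
  | case1 => intro _; simp [pvRunLen]
  | case2 x xs ih =>
    intro hs
    rw [pvRunLen]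
    refine List.pairwise_cons.mpr ⟨?_, ?_⟩
    · intro p hp
      exact pv_drop_gt x xs hs p.1 (pv_fst_mem_runLen _ p hp)
    · exact ih (List.Pairwise.sublist ((List.dropWhile_sublist _).trans (List.sublist_cons_self x xs)) hs)

theorem pv_mem_runLen : ∀ (s : List String), s.Pairwise (· ≤ ·) → ∀ (p : String × Int),
    (p ∈ pvRunLen s ↔ p.1 ∈ s ∧ p.2 = (s.count p.1 : Int)) := by
  intro s
  induction s using pvRunLen.induct with
  | case1 => intro _ p; simp [pvRunLen]
  | case2 x xs ih =>
    intro hs p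
    have hgt := pv_drop_gt x xs hs
    have hxt : x ∉ xs.dropWhile (fun y => y == x) := fun hx => lt_irrefl x (hgt x hx)
    have hwt : xs.takeWhile (fun y => y == x) ++ xs.dropWhile (fun y => y == x) = xs :=
      List.takeWhile_append_dropWhile
    have hw : ∀ y ∈ xs.takeWhile (fun y => y == x), y = x :=
      fun y hy => by simpa using List.mem_takeWhile_imp hy
    have hpt : (xs.dropWhile (fun y => y == x)).Pairwise (· ≤ ·) :=
      List.Pairwise.sublist ((List.dropWhile_sublist _).trans (List.sublist_cons_self x xs)) hs
    have hxscount : xs.count x = (xs.takeWhile (fun y => y == x)).length := by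
      conv_lhs => rw [← hwt]
      rw [List.count_append, List.count_eq_length.mpr (fun b hb => (hw b hb).symm),
          List.count_eq_zero.mpr hxt]
      omega
    have hcx : (x :: xs).count x
        = 1 + (xs.takeWhile (fun y => y == x)).length := by
      rw [List.count_cons_self, hxscount]; omega
    have hcy : ∀ y, y ≠ x → (x :: xs).count y
        = (xs.dropWhile (fun y => y == x)).count y := by
      intro y hy
      have h2 : xs.count y = (xs.dropWhile (fun y => y == x)).count y := by
        conv_lhs => rw [← hwt]
        rw [List.count_append, List.count_eq_zero.mpr (fun hmem => hy (hw y hmem)), Nat.zero_add]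
      rw [List.count_cons_of_ne (Ne.symm hy), h2]
    rw [pvRunLen]
    constructor
    · intro hp
      rcases List.mem_cons.mp hp with rfl | hp'
      · exact ⟨by simp, by rw [hcx]; push_cast; ring⟩
      · obtain ⟨h1, h2⟩ := (ih hpt p).mp hp'
        have hne : p.1 ≠ x := fun he => hxt (he ▸ h1)
        refine ⟨List.mem_cons_of_mem x ((List.dropWhile_sublist _).mem h1), ?_⟩
        rw [hcy p.1 hne]; exact h2
    · rintro ⟨h1, h2⟩
      by_cases hpx : p.1 = x
      · have h2' : p.2 = 1 + ((xs.takeWhile (fun y => y == x)).length : Int) := by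
          rw [h2, hpx, hcx]; push_cast; ring
        have hpe : p = (x, 1 + ((xs.takeWhile (fun y => y == x)).length : Int)) := by
          calc p = (p.1, p.2) := rfl
            _ = _ := by rw [hpx, h2']
        rw [hpe]
        exact List.mem_cons_self
      · right
        apply (ih hpt p).mpr
        have h1' : p.1 ∈ xs := by rcases List.mem_cons.mp h1 with h | h; exact absurd h hpx; exact h
        have h1t : p.1 ∈ xs.dropWhile (fun y => y == x) := by
          rw [← hwt] at h1'
          rcases List.mem_append.mp h1' with h | h
          · exact absurd (hw _ h) hpx
          · exact h
        exact ⟨h1t, by rw [h2, hcy p.1 hpx]⟩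

theorem pv_main (E : List String) :
    PySem.List.sorted2 (PySem.Dict.counter E).items Prod.fst Prod.snd
      = pvRunLen (PySem.List.sorted E (fun x => x)) := by
  have hsp : (PySem.List.sorted E (fun x => x)).Pairwise (· ≤ ·) :=
    PySem.List.sorted_pairwise E (fun x => x)
  have hperm : (PySem.List.sorted E (fun x => x)).Perm E := PySem.List.sorted_perm E _ false
  rw [PySem.Dict.items_counter]
  rw [pv_sorted2_eq_sorted _ _ _
    (by rw [List.map_map]
        have hid : (Prod.fst ∘ fun k => (k, (E.count k : Int))) = id := rfl
        rw [hid, List.map_id]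
        exact PySem.Set.nodup_ofList E)]
  apply PySem.List.sorted_eq_of_perm_of_pairwise_lt
  · -- permutation
    have hnd1 : (pvRunLen (PySem.List.sorted E (fun x => x))).Nodup :=
      (pv_runLen_pairwise _ hsp).imp (fun {a b} h => by intro he; rw [he] at h; exact lt_irrefl _ h)
    have hnd2 : ((PySem.Set.ofList E).map (fun k => (k, (E.count k : Int)))).Nodup :=
      (PySem.Set.nodup_ofList E).map (fun a b hab => congrArg Prod.fst hab)
    apply (List.perm_ext_iff_of_nodup hnd1 hnd2).mpr
    intro p
    rw [pv_mem_runLen _ hsp p, List.mem_map]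
    constructor
    · rintro ⟨h1, h2⟩
      refine ⟨p.1, (PySem.Set.mem_ofList E p.1).mpr (hperm.mem_iff.mp h1), ?_⟩
      rw [hperm.count_eq p.1] at h2
      calc (p.1, (E.count p.1 : Int)) = (p.1, p.2) := by rw [h2]
        _ = p := rfl
    · rintro ⟨k, hk, rfl⟩
      refine ⟨hperm.mem_iff.mpr ((PySem.Set.mem_ofList E k).mp hk), ?_⟩
      simp [hperm.count_eq k]
  · exact pv_runLen_pairwise _ hsp

-- ===== VERDICT (by name: the statement is the Claim_ definition above) =====
theorem pv_fold_eq_counter (labels : List String) :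
    (labels.zip (PySem.List.slice labels (some 1) none)).foldl
        (fun d p =>
          if p.1 = p.2 then d
          else d.insert (pvKey p.1 p.2) (d.getD (pvKey p.1 p.2) 0 + 1))
        PySem.Dict.empty
      = PySem.Dict.counter
          (((labels.zip (PySem.List.slice labels (some 1) none)).filter
              (fun p => !(p.1 == p.2))).map (fun p => pvKey p.1 p.2)) := by
  rw [← PySem.Dict.foldl_insert_getD_add_one_eq_counter, List.foldl_map, List.foldl_filter]
  exact PySem.List.foldl_congr_mem _ _ _ _
    (by intro acc p _; by_cases h : p.1 = p.2 <;> simp [h])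

theorem transition_counts_py_spec : Claim_equal_transition_counts_py := by
  intro labels _
  show transition_counts_py labels = transition_counts_py_alt labels
  simp only [transition_counts_py, transition_counts_py_alt]
  rw [pv_fold_eq_counter labels, pv_main]
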